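-- pv_equiv track=rewrite | github.com/jmseb3/bakjoon | 11. 브루트 포스/2231.py | bunha
-- ===== SOURCE A (Python) =====
-- def bunha(n):
--     if(n < 10):
--         return 2*n
--     sum = n
--     while True:
--         if n >= 10:
--             sum += (n % 10)
--             n = int(n//10)
--         else:
--             sum += n
--             break
--     return sum
-- ===== SOURCE B (Python) =====
-- def bunha(n):
--     if n < 10:
--         return 2 * n
--     return n + sum(int(d) for d in str(n))
-- ===== Notes on version B (the rewrite author's own statement) =====
-- stated objective: simpler
-- what changed: Replaces the explicit while-loop that peels digits with // and % by a single expression summing the digits of str(n).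
import Mathlib
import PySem

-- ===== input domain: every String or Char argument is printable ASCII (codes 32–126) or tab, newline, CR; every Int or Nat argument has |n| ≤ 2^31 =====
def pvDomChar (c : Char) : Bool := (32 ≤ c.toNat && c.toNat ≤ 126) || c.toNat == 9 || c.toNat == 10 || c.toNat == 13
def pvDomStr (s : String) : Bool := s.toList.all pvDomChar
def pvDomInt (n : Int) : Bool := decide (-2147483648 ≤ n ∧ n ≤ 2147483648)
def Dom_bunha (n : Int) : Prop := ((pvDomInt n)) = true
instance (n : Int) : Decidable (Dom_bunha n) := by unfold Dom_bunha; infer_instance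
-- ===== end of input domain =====

-- B replaces A's explicit //-and-% digit-peeling loop by a single expression summing the digits of str(n): simpler, same cost.

-- ===== PORT A =====
-- A's `while True` loop: sum += n % 10; n = n // 10 while n >= 10, then sum += n and break.
def bunhaLoop (n sum : Int) : Int :=
  if h : n ≥ 10 then
    bunhaLoop (PySem.Int.floordiv n 10) (sum + PySem.Int.mod n 10)
  else
    sum + n
termination_by n.toNat
decreasing_by
  have h10 : PySem.Int.floordiv n 10 = n / 10 := PySem.Int.floordiv_eq_ediv_of_pos (by omega)
  have h1 : n / 10 < n := by omega
  have h2 : 0 ≤ n / 10 := by omega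
  rw [h10]; omega

def bunha (n : Int) : Int :=
  if n < 10 then 2 * n
  else bunhaLoop n n

-- ===== PORT B =====
-- int(d) for a one-character digit string d; exact here because str(n) of n ≥ 10 consists of decimal digits.
def digitVal (c : Char) : Int := (PySem.Int.ofChars? [c]).getD 0

def bunha_alt (n : Int) : Int :=
  if n < 10 then 2 * n
  else n + (((PySem.Int.toStr n).toList).map digitVal).sum

-- ===== PRECONDITION & SPEC =====
def Spec_bunha (n : Int) (out : Int) : Prop := out = bunha_alt n
instance (n : Int) (out : Int) : Decidable (Spec_bunha n out) := by unfold Spec_bunha; infer_instance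

-- ===== CLAIM (what is proved, stated in full; the proofs are below) =====
def Claim_equal_bunha : Prop := ∀ (n : Int), Dom_bunha n → Spec_bunha n (bunha n)

-- ===== LEMMAS AND PROOFS =====

-- decimal digit sum, the common value of both sides for n ≥ 10
def dsumN (m : Nat) : Nat :=
  if m < 10 then m else m % 10 + dsumN (m / 10)
decreasing_by exact Nat.div_lt_self (by omega) (by omega)

lemma digitVal_digitChar (d : Nat) (hd : d < 10) : digitVal (Nat.digitChar d) = (d : Int) := by
  interval_cases d <;> decide

lemma bunhaLoop_eq (m : Nat) : ∀ s : Int, bunhaLoop (m : Int) s = s + (dsumN m : Int) := by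
  induction m using Nat.strong_induction_on with
  | _ m ih =>
    intro s
    unfold bunhaLoop
    by_cases h : (m : Int) ≥ 10
    · have hm : 10 ≤ m := by exact_mod_cast h
      rw [dif_pos h]
      rw [show PySem.Int.floordiv (m : Int) 10 = ((m / 10 : Nat) : Int) from
        PySem.Int.floordiv_natCast m 10]
      rw [ih (m / 10) (Nat.div_lt_self (by omega) (by omega))]
      rw [show PySem.Int.mod (m : Int) 10 = ((m % 10 : Nat) : Int) from
        PySem.Int.mod_natCast m 10]
      rw [show dsumN m = m % 10 + dsumN (m / 10) from by rw [dsumN]; simp [Nat.not_lt.mpr hm]]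
      push_cast; ring
    · have hm : m < 10 := by omega
      rw [dif_neg h]
      rw [show dsumN m = m from by rw [dsumN]; simp [hm]]

lemma core_sum : ∀ (fuel m : Nat) (acc : List Char), m < fuel →
    ((Nat.toDigitsCore 10 fuel m acc).map digitVal).sum
      = (dsumN m : Int) + ((acc.map digitVal).sum) := by
  intro fuel
  induction fuel with
  | zero => intro m acc h; omega
  | succ f ih =>
    intro m acc h
    rw [Nat.toDigitsCore]
    by_cases h0 : m / 10 = 0
    · have hm : m < 10 := by omega
      simp only [h0, if_true]
      rw [List.map_cons, List.sum_cons]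
      rw [digitVal_digitChar (m % 10) (Nat.mod_lt _ (by omega))]
      rw [show dsumN m = m from by rw [dsumN]; simp [hm]]
      have : m % 10 = m := Nat.mod_eq_of_lt hm
      rw [this]
    · simp only [if_neg h0]
      have hm : 10 ≤ m := by omega
      rw [ih (m / 10) _ (by omega)]
      rw [List.map_cons, List.sum_cons]
      rw [digitVal_digitChar (m % 10) (Nat.mod_lt _ (by omega))]
      rw [show dsumN m = m % 10 + dsumN (m / 10) from by rw [dsumN]; simp [Nat.not_lt.mpr hm]]
      push_cast; ring

lemma toChars_sum (m : Nat) : ((Nat.toDigits 10 m).map digitVal).sum = (dsumN m : Int) := by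
  have := core_sum (m + 1) m [] (by omega)
  simpa [Nat.toDigits] using this

-- ===== VERDICT (by name: the statement is the Claim_ definition above) =====
theorem bunha_spec : Claim_equal_bunha := by
  intro n _
  show bunha n = bunha_alt n
  unfold bunha bunha_alt
  by_cases h : n < 10
  · simp [h]
  · simp only [if_neg h]
    have hn : 0 ≤ n := by omega
    have hrep : n = ((n.toNat : Nat) : Int) := by omega
    rw [PySem.Int.toList_toStr]
    rw [show PySem.Int.toChars n = Nat.toDigits 10 n.toNat from by
      unfold PySem.Int.toChars; rw [if_neg (by omega)]]
    rw [toChars_sum]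
    rw [hrep, bunhaLoop_eq]; congr 1
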